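-- pv_equiv track=rewrite | github.com/sravan-n/python_programming | mastering_data_structures/nested_lists.py | crossout
-- ===== SOURCE A (Python) =====
-- def crossout(table,row,col):
--     """
--     Returns a copy of the table, missing the given row and column.
--
--     Examples:
--         crossout([[1,3,5],[6,2,7],[5,8,4]],1,2) returns [[1,3],[5,8]]
--         crossout([[1,3,5],[6,2,7],[5,8,4]],0,0) returns [[2,7],[8,4]]
--         crossout([[1,3],[6,2]],0,0) returns [[2]]
--         crossout([[6]],0,0) returns []
--
--     Parameter table: the nested list to process
--     Precondition: table is a table of numbers.  In other words,
--         (1) table is a nested 2D list in row-major order,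
--         (2) each row contains only numbers, and
--         (3) each row is the same length.
--
--     Parameter row: the row to remove
--     Precondition: row is an index (int) for a row of table
--
--     Parameter col: the colummn to remove
--     Precondition: col is an index (int) for a column of table
--     """
--
--     crossout_table = []
--
--     total_rows = len(table)
--     total_columns = len(table[0])
--
--     for row_pos in range(total_rows):
--         if row_pos != row:
--             crossout_table_row = []
--             for col_pos in range(total_columns):
--                 if col_pos != col:
--                     crossout_table_row.append(table[row_pos][col_pos])
--
--             crossout_table.append(crossout_table_row)
--
--     return crossout_table
-- ===== SOURCE B (Python) =====
-- def crossout(table, row, col):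
--     """Delete the k-th element by structural recursion (counting k down); drop the row
--     with it, compute the kept column indices ONCE with it, and gather each surviving
--     row through that index list (no per-element index/equality tests in the row loop)."""
--     def without(xs, k):
--         if not xs:
--             return []
--         rest = without(xs[1:], k - 1)
--         return rest if k == 0 else [xs[0]] + rest
--     keep = without(list(range(len(table[0]))), col)
--     return [[r[j] for j in keep] for r in without(table, row)]
-- ===== Notes on version B (the rewrite author's own statement) =====
-- stated objective: alternative
-- what changed: Replaces A's nested index loops with per-element equality tests by a recursive delete-kth helper: the row is removed by structural recursion and the kept column indices are computed once, each surviving row being gathered through that precomputed index list.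
import Mathlib
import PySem

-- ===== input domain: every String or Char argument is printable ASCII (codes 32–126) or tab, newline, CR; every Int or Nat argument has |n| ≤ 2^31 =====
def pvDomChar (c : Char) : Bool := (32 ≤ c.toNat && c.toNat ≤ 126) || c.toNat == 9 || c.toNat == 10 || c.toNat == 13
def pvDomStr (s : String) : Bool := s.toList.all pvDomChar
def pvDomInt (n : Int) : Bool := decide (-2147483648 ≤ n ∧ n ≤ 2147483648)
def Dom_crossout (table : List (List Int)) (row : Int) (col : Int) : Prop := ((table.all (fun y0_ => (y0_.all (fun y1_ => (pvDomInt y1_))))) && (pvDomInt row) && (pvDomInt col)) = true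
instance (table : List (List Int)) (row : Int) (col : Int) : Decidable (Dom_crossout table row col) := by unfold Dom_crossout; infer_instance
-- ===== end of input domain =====

-- B replaces A's nested index loops by a recursive delete-kth helper: rows dropped by structural recursion, kept column indices computed once and each surviving row gathered through that list (alternative decomposition, same cost).


-- ===== PORT A =====
-- 'table[0]' raises on an empty table (excluded by Pre_); pyGetD with defaults is exact wherever A returns.
def crossout (table : List (List Int)) (row : Int) (col : Int) : List (List Int) :=
  let totalRows : Int := table.length
  let totalColumns : Int := (PySem.List.pyGetD table 0 []).length
  (PySem.List.pyRange 0 totalRows 1).foldl (fun acc rowPos =>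
    if rowPos ≠ row then
      let r := PySem.List.pyGetD table rowPos []
      let newRow := (PySem.List.pyRange 0 totalColumns 1).foldl (fun racc colPos =>
        if colPos ≠ col then racc ++ [PySem.List.pyGetD r colPos 0] else racc) []
      acc ++ [newRow]
    else acc) []

-- ===== PORT B =====
-- recursive delete-kth helper, exactly Source B's 'without'
def pvWithout {α : Type} (xs : List α) (k : Int) : List α :=
  match xs with
  | [] => []
  | h :: t =>
    let rest := pvWithout t (k - 1)
    if k = 0 then rest else h :: rest

-- 'len(table[0])' and 'r[j]' raise exactly where A raises (excluded by Pre_); the pyGetD defaults are exact wherever B returns.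
def crossout_alt (table : List (List Int)) (row : Int) (col : Int) : List (List Int) :=
  let keep : List Int :=
    pvWithout ((List.range (PySem.List.pyGetD table 0 []).length).map (fun j : Nat => (j : Int))) col
  (pvWithout table row).map (fun r => keep.map (fun j => PySem.List.pyGetD r j 0))

-- ===== PRECONDITION & SPEC =====
-- Pre_ excludes exactly the inputs where BOTH Pythons raise IndexError: the empty table
-- (table[0]), and tables where some kept row lacks a kept column index present in row 0.
def Pre_crossout (table : List (List Int)) (row : Int) (col : Int) : Prop :=
  table ≠ [] ∧ ∀ i, i < table.length → ((i : Int) ≠ row) →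
    ∀ j, j < (table.headD []).length → ((j : Int) ≠ col) → j < (table.getD i []).length
instance (table : List (List Int)) (row : Int) (col : Int) : Decidable (Pre_crossout table row col) := by unfold Pre_crossout; infer_instance
def pvWitness_crossout : List (List Int) × Int × Int := ([[1, 3, 5], [6, 2, 7], [5, 8, 4]], 1, 2)

def Spec_crossout (table : List (List Int)) (row : Int) (col : Int) (out : List (List Int)) : Prop := out = crossout_alt table row col
instance (table : List (List Int)) (row : Int) (col : Int) (out : List (List Int)) : Decidable (Spec_crossout table row col out) := by unfold Spec_crossout; infer_instance

-- ===== CLAIM =====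
def Claim_equal_crossout : Prop := ∀ (table : List (List Int)) (row : Int) (col : Int), Dom_crossout table row col → Pre_crossout table row col → Spec_crossout table row col (crossout table row col)

-- ===== LEMMAS AND PROOFS =====

theorem pvWithout_eq_filter {α : Type} (xs : List α) (d : α) (k : Int) :
    pvWithout xs k
      = ((List.range xs.length).filter (fun i : Nat => (i : Int) ≠ k)).map (fun i => xs.getD i d) := by
  induction xs generalizing k with
  | nil => simp [pvWithout]
  | cons a t ih =>
    have hkey : ((List.range (t.length + 1)).filter (fun i : Nat => (i : Int) ≠ k)).map
          (fun i => (a :: t).getD i d)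
        = (if k = 0 then ([] : List α) else [a]) ++
          ((List.range t.length).filter (fun i : Nat => (i : Int) ≠ k - 1)).map
            (fun i => t.getD i d) := by
      rw [List.range_succ_eq_map, List.filter_cons, List.filter_map]
      have hpred : ((fun i : Nat => decide ((i : Int) ≠ k)) ∘ Nat.succ)
          = (fun i : Nat => decide ((i : Int) ≠ k - 1)) := by
        funext i; simp only [Function.comp_def, decide_eq_decide, Nat.succ_eq_add_one]
        push_cast; omega
      rw [hpred]
      by_cases hk : k = 0
      · subst hk
        simp [List.map_map, Function.comp_def, Nat.succ_eq_add_one, List.getD_cons_succ]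
      · have h0 : (((0 : Nat) : Int) ≠ k) := by omega
        have h0z : (0 : Int) ≠ k := by omega
        simp [h0z, hk, List.map_map, Function.comp_def, Nat.succ_eq_add_one,
          List.getD_cons_succ, List.getD_cons_zero]
    simp only [pvWithout, List.length_cons, hkey, ih (k - 1)]
    by_cases hk : k = 0 <;> simp [hk]

-- A's row/column loop, turned into the same filter-and-map form.
theorem pyRange_filter_map {α : Type} (n : Nat) (k : Int) (f : Int → α) :
    ((PySem.List.pyRange 0 (n : Int) 1).filter (fun i => i ≠ k)).map f
      = ((List.range n).filter (fun i : Nat => (i : Int) ≠ k)).map (fun i : Nat => f (i : Int)) := by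
  rw [PySem.List.pyRange_one]
  simp only [Int.sub_zero, Int.toNat_natCast, List.filter_map, List.map_map, Function.comp_def,
    zero_add]

theorem pvWithout_map {α β : Type} (f : α → β) (xs : List α) (k : Int) :
    pvWithout (xs.map f) k = (pvWithout xs k).map f := by
  induction xs generalizing k with
  | nil => simp [pvWithout]
  | cons a t ih => by_cases hk : k = 0 <;> simp [pvWithout, hk, ih]

-- The two ports compute the same list on every input (the pyGetD defaults coincide
-- even outside Pre_; Pre_ is still needed for faithfulness to the raising Pythons).
theorem crossout_eq_alt (table : List (List Int)) (row col : Int) :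
    crossout table row col = crossout_alt table row col := by
  unfold crossout crossout_alt
  simp only [PySem.List.foldl_append_ite, List.nil_append]
  rw [pyRange_filter_map, pvWithout_eq_filter table ([] : List Int) row, List.map_map]
  apply List.map_congr_left
  intro i hi
  simp only [Function.comp_def]
  have hget : PySem.List.pyGetD table (i : Int) [] = table.getD i [] := by
    simp [PySem.List.pyGetD_natCast]
  rw [hget]
  rw [pyRange_filter_map (PySem.List.pyGetD table 0 []).length col
    (fun cp => PySem.List.pyGetD (table.getD i []) cp 0)]
  rw [pvWithout_map, pvWithout_eq_filter (List.range (PySem.List.pyGetD table 0 []).length) (0 : Nat) col,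
    List.map_map, List.map_map]
  simp only [List.length_range]
  apply List.map_congr_left
  intro j hj
  have hjL : j < (PySem.List.pyGetD table 0 []).length := List.mem_range.mp (List.mem_of_mem_filter hj)
  simp [Function.comp_def, List.getD_eq_getElem?_getD, List.getElem?_range, hjL]

-- ===== VERDICT =====
theorem crossout_spec : Claim_equal_crossout := by
  intro table row col _ _
  exact crossout_eq_alt table row col
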